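-- pv_equiv track=rewrite | github.com/Maxime-Labbe/Django-Wordle | app/robot.py | search_word_most_unique_validated_letters
-- ===== SOURCE A (Python) =====
-- def search_word_most_unique_validated_letters(words,words_left,validated_letters):
--     max_letters = 0
--     guesses = []
--     letters = []
--     for word in words_left:
--         for letter in word:
--             if letter not in validated_letters:
--                 letters.append(letter)
--     for word in words:
--         count = 0
--         count_letters = []
--         for letter in word:
--             if letter in letters and letter not in count_letters:
--                 count += 1
--                 count_letters.append(letter)
--         if count == max_letters:
--             guesses.append(word)
--         elif count > max_letters:
--             max_letters = count
--             guesses = [word]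
--     if max_letters < 2:
--         return words_left
--     return guesses
-- ===== SOURCE B (Python) =====
-- def search_word_most_unique_validated_letters(words, words_left, validated_letters):
--     needed = {l for w in words_left for l in w if l not in validated_letters}
--     counts = [0] * len(words)
--     for letter in needed:
--         for i, word in enumerate(words):
--             if letter in word:
--                 counts[i] += 1
--     buckets = {}
--     for word, count in zip(words, counts):
--         buckets.setdefault(count, []).append(word)
--     best = max(buckets, default=0)
--     return words_left if best < 2 else buckets[best]
-- ===== Notes on version B (the rewrite author's own statement) =====
-- stated objective: alternative
-- what changed: B inverts A's traversal and data structure: it counts letter-major (one pass per needed letter incrementing a parallel counts array, instead of A's word-major pass with manual dedup lists) and groups words into count buckets in a dict, returning the bucket of the max key, instead of A's running-max-with-reset loop.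
import Mathlib
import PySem

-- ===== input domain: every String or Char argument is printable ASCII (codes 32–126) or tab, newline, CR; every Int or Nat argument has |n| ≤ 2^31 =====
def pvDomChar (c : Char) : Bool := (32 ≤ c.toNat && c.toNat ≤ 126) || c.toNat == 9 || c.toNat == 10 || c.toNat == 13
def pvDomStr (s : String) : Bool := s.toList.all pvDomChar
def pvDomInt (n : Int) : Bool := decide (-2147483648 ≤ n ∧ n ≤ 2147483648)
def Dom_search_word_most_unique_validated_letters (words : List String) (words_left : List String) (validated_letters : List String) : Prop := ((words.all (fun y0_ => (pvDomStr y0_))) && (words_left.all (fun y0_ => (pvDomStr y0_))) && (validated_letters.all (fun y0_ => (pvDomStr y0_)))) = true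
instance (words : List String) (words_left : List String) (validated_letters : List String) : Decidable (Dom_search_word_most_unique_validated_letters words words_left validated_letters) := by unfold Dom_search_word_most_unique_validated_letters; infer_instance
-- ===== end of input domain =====

-- B inverts A's traversal: it counts letter-major (one pass per needed letter over a
-- parallel counts array) and groups words into count buckets in a dict, returning the
-- top bucket, instead of A's word-major count with a running-max-and-reset loop.


-- ===== PORT A =====
-- letters: all letters of words_left not in validated_letters (with duplicates)
def swLettersA (words_left : List String) (validated_letters : List String) : List Char :=
  words_left.foldl (fun acc word =>
    word.toList.foldl (fun acc2 letter =>
      if Char.toString letter ∈ validated_letters then acc2 else acc2 ++ [letter]) acc) []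

-- inner per-word loop: (count, count_letters)
def swCountA (letters : List Char) (word : String) : Nat × List Char :=
  word.toList.foldl (fun p letter =>
    if letter ∈ letters ∧ letter ∉ p.2 then (p.1 + 1, p.2 ++ [letter]) else p)
    (0, ([] : List Char))

def search_word_most_unique_validated_letters (words : List String) (words_left : List String) (validated_letters : List String) : List String :=
  let letters := swLettersA words_left validated_letters
  let st := words.foldl (fun (st : Nat × List String) word =>
    let count := (swCountA letters word).1
    if count = st.1 then (st.1, st.2 ++ [word])
    else if count > st.1 then (count, [word])
    else st) (0, ([] : List String))
  if st.1 < 2 then words_left else st.2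

-- ===== PORT B =====
-- needed = {l for w in words_left for l in w if l not in validated_letters}
def swNeededB (words_left : List String) (validated_letters : List String) : PySem.Set Char :=
  PySem.Set.ofList (words_left.flatMap (fun w =>
    w.toList.filter (fun l => !(validated_letters.contains (Char.toString l)))))

def search_word_most_unique_validated_letters_alt (words : List String) (words_left : List String) (validated_letters : List String) : List String :=
  let needed := swNeededB words_left validated_letters
  -- counts = [0]*len(words); for letter in needed: for i, word in enumerate(words):
  --   if letter in word: counts[i] += 1   (index-wise increment = zipWith over words/counts;
  --   single-character 'letter in word' is exactly char membership in the string)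
  let counts : List Nat := needed.foldl (fun cs letter =>
    List.zipWith (fun word c => if letter ∈ word.toList then c + 1 else c) words cs)
    (List.replicate words.length 0)
  -- buckets: dict count -> words with that count, via setdefault(count, []).append(word)
  let buckets : PySem.Dict Nat (List String) :=
    (words.zip counts).foldl (fun d p => d.modify p.2 [] (fun l => l ++ [p.1]))
      PySem.Dict.empty
  let best := PySem.List.maxD buckets.keys (fun x => x) 0   -- max(buckets, default=0)
  if best < 2 then words_left
  else buckets.getD best []   -- buckets[best]: best is a key whenever this branch is taken

-- ===== PRECONDITION & SPEC =====
def Spec_search_word_most_unique_validated_letters (words : List String) (words_left : List String) (validated_letters : List String) (out : List String) : Prop := out = search_word_most_unique_validated_letters_alt words words_left validated_letters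
instance (words : List String) (words_left : List String) (validated_letters : List String) (out : List String) : Decidable (Spec_search_word_most_unique_validated_letters words words_left validated_letters out) := by unfold Spec_search_word_most_unique_validated_letters; infer_instance

-- ===== CLAIM (what is proved, stated in full; the proofs are below) =====
def Claim_equal_search_word_most_unique_validated_letters : Prop := ∀ (words : List String) (words_left : List String) (validated_letters : List String), Dom_search_word_most_unique_validated_letters words words_left validated_letters → Spec_search_word_most_unique_validated_letters words words_left validated_letters (search_word_most_unique_validated_letters words words_left validated_letters)

-- ===== LEMMAS AND PROOFS =====

-- A's inner letter loop over one word, with a generalized accumulator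
theorem inner_letters (vl : List String) (cs : List Char) (acc : List Char) :
    cs.foldl (fun a c => if Char.toString c ∈ vl then a else a ++ [c]) acc
      = acc ++ cs.filter (fun c => !(vl.contains (Char.toString c))) := by
  induction cs generalizing acc with
  | nil => simp
  | cons c t ih =>
    rw [List.foldl_cons, List.filter_cons]
    by_cases h : Char.toString c ∈ vl
    · rw [if_pos h, ih]
      have hb : (!(vl.contains (Char.toString c))) = false := by simpa using h
      rw [hb]; simp
    · rw [if_neg h, ih]
      have hb : (!(vl.contains (Char.toString c))) = true := by simpa using h
      rw [hb]; simp

theorem lettersA_eq (words_left validated_letters : List String) :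
    swLettersA words_left validated_letters
      = words_left.flatMap (fun w =>
          w.toList.filter (fun l => !(validated_letters.contains (Char.toString l)))) := by
  unfold swLettersA
  simp only [inner_letters]
  rw [PySem.List.foldl_append_eq_flatMap]
  simp

-- A's inner count loop keeps the shape (s.length, s) with s the first-occurrence
-- dedup (PySem.Set built by add) of the needed letters seen so far
theorem countA_shape (L : List Char) (cs : List Char) (s : List Char) :
    cs.foldl (fun (p : Nat × List Char) c =>
        if c ∈ L ∧ c ∉ p.2 then (p.1 + 1, p.2 ++ [c]) else p) (s.length, s)
      = (((cs.filter (fun c => decide (c ∈ L))).foldl PySem.Set.add s).length,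
         (cs.filter (fun c => decide (c ∈ L))).foldl PySem.Set.add s) := by
  induction cs generalizing s with
  | nil => simp
  | cons c t ih =>
    by_cases hL : c ∈ L
    · by_cases hs : c ∈ s
      · have : PySem.Set.add s c = s := PySem.Set.add_of_mem hs
        simp [hL, hs, ih]
      · have hadd : PySem.Set.add s c = s ++ [c] := PySem.Set.add_of_not_mem hs
        have hlen : (s ++ [c]).length = s.length + 1 := by simp
        have h2 : List.filter (fun c => decide (c ∈ L)) (c :: t)
            = c :: List.filter (fun c => decide (c ∈ L)) t := by simp [hL]
        rw [List.foldl_cons, if_pos ⟨hL, hs⟩, h2, List.foldl_cons, hadd]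
        have hres := ih (s ++ [c])
        rw [hlen] at hres
        exact hres
    · simp [hL, ih]

-- A's distinct-needed-letter count of a word = countP over any nodup list N with the
-- same membership as letters
theorem countA_eq_countP (letters : List Char) (N : List Char) (hnd : N.Nodup)
    (hmem : ∀ c : Char, c ∈ N ↔ c ∈ letters) (word : String) :
    (swCountA letters word).1 = (N.filter (fun l => decide (l ∈ word.toList))).length := by
  unfold swCountA
  have h0 := countA_shape letters word.toList []
  simp only [List.length_nil] at h0
  rw [h0]
  have hK1 : (word.toList.filter (fun c => decide (c ∈ letters))).foldl PySem.Set.add []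
      = PySem.Set.ofList (word.toList.filter (fun c => decide (c ∈ letters))) :=
    (PySem.Set.ofList_eq_foldl _).symm
  rw [hK1]
  apply List.Perm.length_eq
  rw [List.perm_ext_iff_of_nodup]
  · intro a
    rw [PySem.Set.mem_ofList, List.mem_filter, List.mem_filter]
    constructor
    · rintro ⟨h1, h2⟩
      exact ⟨(hmem a).2 (by simpa using h2), by simpa using h1⟩
    · rintro ⟨h1, h2⟩
      exact ⟨by simpa using h2, by simpa using (hmem a).1 h1⟩
  · exact PySem.Set.nodup_ofList _
  · exact hnd.filter _

-- A's running-max-with-reset loop equals "overall max, then filter"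
theorem fold_spec (cnt : String → Nat) (ws : List String) (m : Nat) (g : List String) :
    ws.foldl (fun (st : Nat × List String) word =>
      let count := cnt word
      if count = st.1 then (st.1, st.2 ++ [word])
      else if count > st.1 then (count, [word])
      else st) (m, g)
    = (ws.foldl (fun a w => max a (cnt w)) m,
       (if ws.foldl (fun a w => max a (cnt w)) m = m then g else [])
         ++ ws.filter (fun w => cnt w = ws.foldl (fun a w => max a (cnt w)) m)) := by
  induction ws generalizing m g with
  | nil => simp
  | cons w t ih =>
    have hmap : ∀ x : Nat, t.foldl (fun a w => max a (cnt w)) x = (t.map cnt).foldl max x := by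
      intro x; rw [List.foldl_map]
    simp only [List.foldl_cons, List.filter_cons]
    by_cases h1 : cnt w = m
    · have hmax : max m (cnt w) = m := by rw [h1, Nat.max_self]
      rw [if_pos h1, ih]
      simp only [hmax]
      by_cases h2 : t.foldl (fun a w => max a (cnt w)) m = m
      · have h3 : cnt w = t.foldl (fun a w => max a (cnt w)) m := by rw [h1, h2]
        simp [h2, h3]
      · have h3 : ¬ (cnt w = t.foldl (fun a w => max a (cnt w)) m) := by
          rw [h1]; exact fun hh => h2 hh.symm
        simp [h2, h3]
    · by_cases h2 : cnt w > m
      · have hmax : max m (cnt w) = cnt w := Nat.max_eq_right (Nat.le_of_lt h2)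
        have hM : cnt w ≤ t.foldl (fun a w => max a (cnt w)) (cnt w) := by
          rw [hmap]; exact (PySem.List.le_foldl_max _ _).1
        have hne : t.foldl (fun a w => max a (cnt w)) (cnt w) ≠ m := by omega
        rw [if_neg h1, if_pos h2, ih]
        simp only [hmax, if_neg hne]
        by_cases h3 : cnt w = t.foldl (fun a w => max a (cnt w)) (cnt w)
        · rw [if_pos h3.symm]
          have hd := decide_eq_true h3
          rw [hd]; simp
        · have h4 : ¬ (t.foldl (fun a w => max a (cnt w)) (cnt w) = cnt w) :=
            fun hh => h3 hh.symm
          simp [h3, h4]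
      · have hlt : cnt w < m := by omega
        have hmax : max m (cnt w) = m := Nat.max_eq_left (Nat.le_of_lt hlt)
        have hM : m ≤ t.foldl (fun a w => max a (cnt w)) m := by
          rw [hmap]; exact (PySem.List.le_foldl_max _ _).1
        have hne : ¬ (cnt w = t.foldl (fun a w => max a (cnt w)) m) := by omega
        rw [if_neg h1, if_neg h2, ih]
        simp only [hmax]
        simp [hne]

-- zip with the mapped copy of the same list projects back on the right
theorem zip_map_snd {β : Type} (f : String → β) (ws : List String) :
    (ws.zip (ws.map f)).map Prod.snd = ws.map f := by
  induction ws with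
  | nil => rfl
  | cons w t ih => simp [ih]

-- zipWith over words and (words.map g) maps pointwise
theorem zipWith_map_self {β : Type} (f : String → β → β) (g : String → β) (ws : List String) :
    List.zipWith f ws (ws.map g) = ws.map (fun w => f w (g w)) := by
  induction ws with
  | nil => rfl
  | cons w t ih => simp [ih]

-- B's letter-major counting loop: after folding the letters of N, each word's count is
-- its start value plus the number of letters of N it contains
theorem counts_spec (ws : List String) (N : List Char) (g : String → Nat) :
    N.foldl (fun cs letter =>
        List.zipWith (fun word c => if letter ∈ word.toList then c + 1 else c) ws cs)
      (ws.map g)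
    = ws.map (fun w => g w + (N.filter (fun l => decide (l ∈ w.toList))).length) := by
  induction N generalizing g with
  | nil => simp
  | cons l t ih =>
    rw [List.foldl_cons, zipWith_map_self]
    rw [ih (fun w => if l ∈ w.toList then g w + 1 else g w)]
    apply List.map_congr_left
    intro w _
    by_cases h : l ∈ w.toList
    · simp [h]; omega
    · simp [h]

-- the running max of a list from a is a or an element of the list
theorem foldl_max_mem (xs : List Nat) (a : Nat) :
    xs.foldl max a = a ∨ xs.foldl max a ∈ xs := by
  induction xs generalizing a with
  | nil => left; rfl
  | cons x t ih =>
    rw [List.foldl_cons]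
    rcases ih (max a x) with h | h
    · rcases max_choice a x with hm | hm
      · left; rw [h, hm]
      · right; rw [h, hm]; exact List.mem_cons_self
    · right; exact List.mem_cons_of_mem _ h

-- lists with the same membership have the same running max from 0
theorem foldl_max_eq_of_mem_iff (xs ys : List Nat) (h : ∀ n, n ∈ xs ↔ n ∈ ys) :
    xs.foldl max 0 = ys.foldl max 0 := by
  have key : ∀ (us vs : List Nat), (∀ n, n ∈ us → n ∈ vs) →
      us.foldl max 0 ≤ vs.foldl max 0 := by
    intro us vs hsub
    rcases foldl_max_mem us 0 with h0 | h0
    · rw [h0]; exact Nat.zero_le _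
    · exact (PySem.List.le_foldl_max vs 0).2 _ (hsub _ h0)
  exact Nat.le_antisymm (key xs ys fun n => (h n).1) (key ys xs fun n => (h n).2)

-- B's bucket-building loop: the bucket at k collects, in order, the first components of
-- the pairs whose second component is k
theorem bucket_getD (ps : List (String × Nat)) (d : PySem.Dict Nat (List String)) (k : Nat) :
    ((ps.foldl (fun d p => d.modify p.2 [] (fun l => l ++ [p.1])) d)).getD k []
      = d.getD k [] ++ (ps.filter (fun p => decide (p.2 = k))).map Prod.fst := by
  induction ps generalizing d with
  | nil => simp
  | cons p t ih =>
    rw [List.foldl_cons, ih, List.filter_cons]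
    by_cases h : p.2 = k
    · subst h
      rw [PySem.Dict.getD_modify_self]
      simp
    · rw [PySem.Dict.getD_modify_of_ne _ _ _ (fun hh => h hh.symm)]
      simp [h]

theorem maxD_eq_foldl (xs : List Nat) :
    PySem.List.maxD xs (fun x => x) 0 = xs.foldl max 0 := by
  cases xs with
  | nil => rfl
  | cons x t =>
    rw [PySem.List.maxD, PySem.List.max?_id_cons]
    simp [Option.getD]

theorem zip_filter_map (cnt : String → Nat) (ws : List String) (M : Nat) :
    ((ws.zip (ws.map cnt)).filter (fun p => decide (p.2 = M))).map Prod.fst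
      = ws.filter (fun w => decide (cnt w = M)) := by
  induction ws with
  | nil => rfl
  | cons w t ih =>
    simp only [List.map_cons, List.zip_cons_cons, List.filter_cons]
    by_cases h : cnt w = M <;> simp [h, ih]

-- ===== VERDICT (by name: the statement is the Claim_ definition above) =====
theorem search_word_most_unique_validated_letters_spec : Claim_equal_search_word_most_unique_validated_letters := by
  intro words words_left validated_letters _
  unfold Spec_search_word_most_unique_validated_letters
  simp only [search_word_most_unique_validated_letters,
    search_word_most_unique_validated_letters_alt]
  set letters := swLettersA words_left validated_letters with hlet
  set needed := swNeededB words_left validated_letters with hneed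
  have hmem : ∀ c : Char, c ∈ needed ↔ c ∈ letters := by
    intro c
    rw [hneed, swNeededB, PySem.Set.mem_ofList, hlet, lettersA_eq]
  have hnd : needed.Nodup := PySem.Set.nodup_ofList _
  -- the two counting schemes agree word-by-word
  set cnt : String → Nat := fun w => (swCountA letters w).1 with hcnt
  have hcounts :
      needed.foldl (fun cs letter =>
          List.zipWith (fun word c => if letter ∈ word.toList then c + 1 else c) words cs)
        (List.replicate words.length 0)
      = words.map cnt := by
    have hrep : (List.replicate words.length 0) = words.map (fun _ => 0) := by
      rw [← List.map_const]; rfl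
    rw [hrep, counts_spec]
    apply List.map_congr_left
    intro w _
    simp only [Nat.zero_add]
    exact (countA_eq_countP letters needed hnd hmem w).symm
  rw [hcounts, fold_spec]
  -- the keys of the bucket dict have the same membership as the counts list
  have hkeys : ∀ n : Nat,
      n ∈ ((words.zip (words.map cnt)).foldl
        (fun d p => d.modify p.2 [] (fun l => l ++ [p.1])) PySem.Dict.empty).keys
      ↔ n ∈ words.map cnt := by
    intro n
    rw [PySem.Dict.keys_foldl_modify_key]
    have hsnd : (words.zip (words.map cnt)).map Prod.snd = words.map cnt :=
      zip_map_snd cnt words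
    rw [hsnd, PySem.Dict.keys_empty]
    have : PySem.Set.update ([] : PySem.Set Nat) (words.map cnt)
        = PySem.Set.ofList (words.map cnt) := by
      rw [PySem.Set.update, ← PySem.Set.ofList_eq_foldl]
    rw [this, PySem.Set.mem_ofList]
  have hbest : PySem.List.maxD ((words.zip (words.map cnt)).foldl
        (fun d p => d.modify p.2 [] (fun l => l ++ [p.1])) PySem.Dict.empty).keys
        (fun x => x) 0
      = words.foldl (fun a w => max a (cnt w)) 0 := by
    rw [maxD_eq_foldl, foldl_max_eq_of_mem_iff _ (words.map cnt) hkeys, List.foldl_map]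
  simp only [hbest]
  set M := words.foldl (fun a w => max a (cnt w)) 0 with hM
  by_cases hlt : M < 2
  · simp [hlt]
  · rw [if_neg hlt, if_neg hlt]
    rw [bucket_getD, PySem.Dict.getD_empty, List.nil_append, zip_filter_map]
    rw [ite_self, List.nil_append]
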